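-- pv_equiv track=rewrite | github.com/gudrb4869/algorithm | 카카오 문제모음/2022 KAKAO TECH INTERNSHIP/등산코스 정하기.py | solution
-- ===== SOURCE A (Python) =====
-- import heapq
--
-- INF = int(1e8)
--
-- def solution(n, paths, gates, summits):
--     summits = set(summits)
--     graph = [[] for _ in range(n + 1)]
--     for i, j, w in paths:
--         graph[i].append((j, w))
--         graph[j].append((i, w))
--
--     q = []
--     dist = [INF] * (n + 1)
--     for gate in gates:
--         dist[gate] = 0
--         heapq.heappush(q, (0, gate))
--     while q:
--         intensity, i = heapq.heappop(q)
--         if dist[i] < intensity or i in summits: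
--             continue
--         for j, w in graph[i]:
--             time = max(intensity, w)
--             if time < dist[j]:
--                 dist[j] = time
--                 heapq.heappush(q, (time, j))
--     return sorted([[summit, dist[summit]] for summit in summits], key=lambda x :(x[1], x[0]))[0]
-- ===== SOURCE B (Python) =====
-- INF = int(1e8)
--
-- def solution(n, paths, gates, summits):
--     # Bellman-Ford-style minimax: relax the edge list in rounds until stable
--     # (no priority queue); summits never relay (edges out of a summit are skipped).
--     S = set(summits)
--     edges = []
--     for i, j, w in paths:
--         edges.append((i, j, w))
--         edges.append((j, i, w))
--     dist = [INF] * (n + 1)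
--     for g in gates:
--         dist[g] = 0
--     changed = True
--     while changed:
--         changed = False
--         for i, j, w in edges:
--             if i not in S:
--                 t = max(dist[i], w)
--                 if t < dist[j]:
--                     dist[j] = t
--                     changed = True
--     d, s = min((dist[s], s) for s in summits)
--     return [s, d]
-- ===== Notes on version B (the rewrite author's own statement) =====
-- stated objective: alternative
-- what changed: Replaces the heap-based Dijkstra worklist with a Bellman-Ford-style fixed-point computation: the doubled edge list is relaxed in full rounds (summits never relay) until a round changes nothing, and the answer summit is picked by a single min over (dist, id) instead of building and sorting the summit table.
-- outside the precondition, e.g. on solution(2, [(0, 2, 3), (-1, 1, 2)], [0], [2, 1]): A returns [2, 3], B returns [1, 3]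
import Mathlib
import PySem

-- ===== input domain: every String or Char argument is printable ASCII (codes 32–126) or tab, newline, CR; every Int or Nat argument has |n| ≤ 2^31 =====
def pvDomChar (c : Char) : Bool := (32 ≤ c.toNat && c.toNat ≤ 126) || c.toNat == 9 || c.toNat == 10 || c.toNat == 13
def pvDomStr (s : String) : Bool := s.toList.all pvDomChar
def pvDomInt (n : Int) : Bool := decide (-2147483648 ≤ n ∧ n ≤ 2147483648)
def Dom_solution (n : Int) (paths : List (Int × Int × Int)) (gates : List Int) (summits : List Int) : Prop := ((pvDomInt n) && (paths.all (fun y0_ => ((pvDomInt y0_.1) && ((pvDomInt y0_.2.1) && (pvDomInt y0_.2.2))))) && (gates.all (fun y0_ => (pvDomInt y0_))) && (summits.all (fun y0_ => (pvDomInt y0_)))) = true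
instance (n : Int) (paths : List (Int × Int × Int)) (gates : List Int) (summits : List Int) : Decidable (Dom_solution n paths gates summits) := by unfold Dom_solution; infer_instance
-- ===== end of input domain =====

-- B replaces A's heap-based Dijkstra with round-based edge-list relaxation to a fixed point
-- (Bellman-Ford style) and a single min over (dist, id); alternative algorithm, same results.

def pvINF : Int := 100000000

-- Python's list-index rule for the dist/graph arrays of length n+1: a negative id
-- indexes from the end (exact on -(n+1) ≤ x ≤ n, the ids Pre_ admits)
def pvWrap (n : Int) (x : Int) : Int := if x < 0 then x + (n + 1) else x

def pvFset (d : Int → Int) (k v : Int) : Int → Int := fun x => if x = k then v else d x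

-- ===== PORT A =====

-- graph[i].append(x)
def pvAdj (g : Int → List (Int × Int)) (k : Int) (x : Int × Int) : Int → List (Int × Int) :=
  fun v => if v = k then g v ++ [x] else g v

-- the adjacency-building loop over paths
def pvGraph (paths : List (Int × Int × Int)) : Int → List (Int × Int) :=
  paths.foldl (fun g e => pvAdj (pvAdj g e.1 (e.2.1, e.2.2)) e.2.1 (e.1, e.2.2)) (fun _ => [])

-- Python tuple comparison on (intensity, node)
def pvLt (a b : Int × Int) : Bool := a.1 < b.1 || (a.1 == b.1 && a.2 < b.2)

-- heapq.heappop pops the minimum tuple of the heap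
def pvMinPair (x : Int × Int) (l : List (Int × Int)) : Int × Int :=
  l.foldl (fun m y => if pvLt y m then y else m) x

-- the gate loop: dist[gate] = 0; heappush(q, (0, gate))
def pvInitA (gates : List Int) : (Int → Int) × List (Int × Int) :=
  gates.foldl (fun s g => (pvFset s.1 g 0, s.2 ++ [(0, g)])) ((fun _ => pvINF), [])

-- the inner for-loop over graph[i] relaxing neighbours (intensity p)
def pvRelaxA (p : Int) (adj : List (Int × Int))
    (s : (Int → Int) × List (Int × Int)) : (Int → Int) × List (Int × Int) :=
  adj.foldl (fun s jw =>
      let t := max p jw.2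
      if t < s.1 jw.1 then (pvFset s.1 jw.1 t, s.2 ++ [(t, jw.1)]) else s) s

-- the while-loop (fuelled; the fuel chosen in `solution` provably suffices)
def pvLoopA (summits : List Int) (graph : Int → List (Int × Int)) :
    Nat → (Int → Int) → List (Int × Int) → (Int → Int)
  | 0, dist, _ => dist
  | f+1, dist, q =>
    match q with
    | [] => dist
    | x :: rest =>
      let m := pvMinPair x rest
      let q' := (x :: rest).erase m
      if dist m.2 < m.1 ∨ m.2 ∈ summits then pvLoopA summits graph f dist q'
      else
        let s := pvRelaxA m.1 (graph m.2) (dist, q')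
        pvLoopA summits graph f s.1 s.2

def solution (n : Int) (paths : List (Int × Int × Int)) (gates : List Int) (summits : List Int) : List Int :=
  let graph := pvGraph (paths.map (fun p => (pvWrap n p.1, pvWrap n p.2.1, p.2.2)))
  let init := pvInitA (gates.map (pvWrap n))
  let dist := pvLoopA (summits.map (pvWrap n)) graph
    (((n+1) * pvINF).toNat + gates.length + 1) init.1 init.2
  PySem.List.pyGetD
    (PySem.List.sorted2 ((PySem.Set.ofList summits).map (fun s => [s, dist (pvWrap n s)]))
      (fun x => PySem.List.pyGetD x 1 0) (fun x => PySem.List.pyGetD x 0 0))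
    0 []

-- ===== PORT B =====

-- the doubled edge list (appends, as Source B builds it)
def pvEdges (paths : List (Int × Int × Int)) : List (Int × Int × Int) :=
  paths.foldl (fun acc e => acc ++ [(e.1, e.2.1, e.2.2), (e.2.1, e.1, e.2.2)]) []

-- dist = {v: INF ...}; for g in gates: dist[g] = 0   (as a map)
def pvInitB (gates : List Int) : Int → Int :=
  gates.foldl (fun d g => pvFset d g 0) (fun _ => pvINF)

-- one edge of a relaxation round
def pvStepB (summits : List Int) (s : (Int → Int) × Bool) (e : Int × Int × Int) : (Int → Int) × Bool :=
  if e.1 ∈ summits then s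
  else
    let t := max (s.1 e.1) e.2.2
    if t < s.1 e.2.1 then (pvFset s.1 e.2.1 t, true) else s

-- while changed: run one full round; stop when a round changes nothing (fuelled, fuel suffices)
def pvLoopB (summits : List Int) (E : List (Int × Int × Int)) : Nat → (Int → Int) → (Int → Int)
  | 0, d => d
  | f+1, d =>
    let s := E.foldl (pvStepB summits) (d, false)
    if s.2 then pvLoopB summits E f s.1 else s.1

def solution_alt (n : Int) (paths : List (Int × Int × Int)) (gates : List Int) (summits : List Int) : List Int :=
  let E := pvEdges (paths.map (fun p => (pvWrap n p.1, pvWrap n p.2.1, p.2.2)))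
  let dist := pvLoopB (summits.map (pvWrap n)) E (((n+1) * pvINF).toNat + 1)
    (pvInitB (gates.map (pvWrap n)))
  match PySem.List.min2? summits (fun s => dist (pvWrap n s)) (fun s => s) with
  | some s => [s, dist (pvWrap n s)]
  | none => []

-- ===== PRECONDITION & SPEC =====
-- every id (path endpoint, gate, summit) that the input mentions
def pvIds (paths : List (Int × Int × Int)) (gates : List Int) (summits : List Int) : List Int :=
  paths.flatMap (fun p => [p.1, p.2.1]) ++ gates ++ summits

-- Pre_ is A's return domain minus summit-label aliasing: it requires at least one summit and
-- every id in -(n+1)..n (outside that range, or with n < 0 or no summit, A raises IndexError),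
-- and excludes inputs where a used id x and a summit s are distinct labels of the same list
-- cell (|x - s| = n+1): there Python's negative-index aliasing of the dist array combines
-- accidentally with raw-id summit tests, an artefact of the list representation.
def Pre_solution (n : Int) (paths : List (Int × Int × Int)) (gates : List Int) (summits : List Int) : Prop :=
  0 ≤ n ∧ summits ≠ [] ∧
  (∀ e ∈ paths, -(n+1) ≤ e.1 ∧ e.1 ≤ n ∧ -(n+1) ≤ e.2.1 ∧ e.2.1 ≤ n) ∧
  (∀ g ∈ gates, -(n+1) ≤ g ∧ g ≤ n) ∧
  (∀ s ∈ summits, -(n+1) ≤ s ∧ s ≤ n) ∧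
  (∀ s ∈ summits, ∀ x ∈ pvIds paths gates summits, x ≠ s + (n+1) ∧ s ≠ x + (n+1))
instance (n : Int) (paths : List (Int × Int × Int)) (gates : List Int) (summits : List Int) : Decidable (Pre_solution n paths gates summits) := by unfold Pre_solution; infer_instance

def pvWitness_solution : Int × (List (Int × Int × Int)) × List Int × List Int :=
  (2, [(1, 2, 5)], [1], [2])

def Spec_solution (n : Int) (paths : List (Int × Int × Int)) (gates : List Int) (summits : List Int) (out : List Int) : Prop := out = solution_alt n paths gates summits
instance (n : Int) (paths : List (Int × Int × Int)) (gates : List Int) (summits : List Int) (out : List Int) : Decidable (Spec_solution n paths gates summits out) := by unfold Spec_solution; infer_instance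

-- ===== CLAIM (what is proved, stated in full; the proofs are below) =====
def Claim_equal_solution : Prop := ∀ (n : Int) (paths : List (Int × Int × Int)) (gates : List Int) (summits : List Int), Dom_solution n paths gates summits → Pre_solution n paths gates summits → Spec_solution n paths gates summits (solution n paths gates summits)

-- ===== LEMMAS AND PROOFS =====

-- A "solution" of the constraint system: bounded, zero at gates, closed under
-- relaxation along edges whose source is not a summit.  Both programs compute the
-- pointwise-greatest solution, hence the same dist values.
def pvSol (gates summits : List Int) (E : List (Int × Int × Int)) (d : Int → Int) : Prop :=
  (∀ v, 0 ≤ d v ∧ d v ≤ pvINF) ∧ (∀ g ∈ gates, d g = 0) ∧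
  (∀ e ∈ E, e.1 ∉ summits → d e.2.1 ≤ max (d e.1) e.2.2)

-- bounds + gates-zero + dominates every solution: invariant of both programs
def pvGood (gates summits : List Int) (E : List (Int × Int × Int)) (d : Int → Int) : Prop :=
  (∀ v, 0 ≤ d v ∧ d v ≤ pvINF) ∧ (∀ g ∈ gates, d g = 0) ∧
  (∀ x, pvSol gates summits E x → ∀ v, x v ≤ d v)

def pvSum (N : Nat) (d : Int → Int) : Int := ∑ k ∈ Finset.range N, d (k : Int)

lemma pvSum_nonneg (N : Nat) (d : Int → Int) (h : ∀ v, 0 ≤ d v) : 0 ≤ pvSum N d :=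
  Finset.sum_nonneg fun _ _ => h _

lemma pvSum_le (N : Nat) (d : Int → Int) (h : ∀ v, d v ≤ pvINF) : pvSum N d ≤ N * pvINF := by
  calc pvSum N d ≤ ∑ _k ∈ Finset.range N, pvINF := Finset.sum_le_sum fun _ _ => h _
    _ = N * pvINF := by simp [Finset.sum_const, Finset.card_range]

lemma pvSum_fset (N : Nat) (d : Int → Int) (j t : Int) (h0 : 0 ≤ j) (hj : j.toNat < N) :
    pvSum N (pvFset d j t) = pvSum N d + t - d j := by
  have hmem : j.toNat ∈ Finset.range N := Finset.mem_range.2 hj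
  have h1 : pvSum N (pvFset d j t)
      = ∑ k ∈ Finset.range N, Function.update (fun (k : Nat) => d (k : Int)) j.toNat t k := by
    refine Finset.sum_congr rfl fun k _ => ?_
    by_cases hk : k = j.toNat
    · subst hk
      simp [pvFset, Function.update, Int.toNat_of_nonneg h0]
    · have : (k : Int) ≠ j := by
        intro he; exact hk (by omega)
      simp [pvFset, Function.update, hk, this]
  have h2 : ∑ k ∈ Finset.range N, Function.update (fun (k : Nat) => d (k : Int)) j.toNat t k
      = t + ∑ k ∈ Finset.range N \ {j.toNat}, d (k : Int) := Finset.sum_update_of_mem hmem _ _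
  have h3 : pvSum N d = ∑ k ∈ Finset.range N \ {j.toNat}, d (k : Int) + d (j.toNat : Int) :=
    Finset.sum_eq_sum_diff_singleton_add hmem _
  have hjj : ((j.toNat : Nat) : Int) = j := Int.toNat_of_nonneg h0
  rw [h1, h2]
  rw [hjj] at h3
  omega

lemma pvEdges_eq (paths : List (Int × Int × Int)) :
    pvEdges paths = paths.flatMap (fun p => [(p.1, p.2.1, p.2.2), (p.2.1, p.1, p.2.2)]) := by
  suffices h : ∀ acc, paths.foldl (fun acc e => acc ++ [(e.1, e.2.1, e.2.2), (e.2.1, e.1, e.2.2)]) acc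
      = acc ++ paths.flatMap (fun p => [(p.1, p.2.1, p.2.2), (p.2.1, p.1, p.2.2)]) by
    simpa [pvEdges] using h []
  induction paths with
  | nil => simp
  | cons p rest ih => intro acc; simp [List.foldl_cons, ih]

lemma mem_pvEdges (paths : List (Int × Int × Int)) (e : Int × Int × Int) :
    e ∈ pvEdges paths ↔ ∃ p ∈ paths, e = (p.1, p.2.1, p.2.2) ∨ e = (p.2.1, p.1, p.2.2) := by
  rw [pvEdges_eq]
  simp [List.mem_flatMap]

lemma mem_pvAdj (g : Int → List (Int × Int)) (k : Int) (x : Int × Int) (v : Int) (y : Int × Int) :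
    y ∈ pvAdj g k x v ↔ y ∈ g v ∨ (v = k ∧ y = x) := by
  by_cases h : v = k <;> simp [pvAdj, h]

lemma mem_pvGraph (paths : List (Int × Int × Int)) (v x w : Int) :
    (x, w) ∈ pvGraph paths v ↔ (v, x, w) ∈ pvEdges paths := by
  rw [pvEdges_eq]
  suffices h : ∀ g0, (x, w) ∈ (paths.foldl
      (fun g e => pvAdj (pvAdj g e.1 (e.2.1, e.2.2)) e.2.1 (e.1, e.2.2)) g0) v
      ↔ (x, w) ∈ g0 v ∨ (v, x, w) ∈ paths.flatMap (fun p => [(p.1, p.2.1, p.2.2), (p.2.1, p.1, p.2.2)]) by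
    simpa [pvGraph] using h (fun _ => [])
  induction paths with
  | nil => simp
  | cons e rest ih =>
    intro g0
    rw [List.foldl_cons, ih]
    simp only [mem_pvAdj, List.flatMap_cons, List.mem_append, List.mem_cons, Prod.ext_iff]
    tauto

lemma pvInitA_eq (gates : List Int) :
    pvInitA gates = (pvInitB gates, gates.map (fun g => (0, g))) := by
  suffices h : ∀ (d : Int → Int) (q : List (Int × Int)),
      gates.foldl (fun s g => (pvFset s.1 g 0, s.2 ++ [(0, g)])) (d, q)
      = (gates.foldl (fun d g => pvFset d g 0) d, q ++ gates.map (fun g => (0, g))) by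
    simpa [pvInitA, pvInitB] using h (fun _ => pvINF) []
  induction gates with
  | nil => simp
  | cons g rest ih => intro d q; simp [List.foldl_cons, ih]

lemma pvInitB_val (gates : List Int) (v : Int) :
    pvInitB gates v = if v ∈ gates then 0 else pvINF := by
  suffices h : ∀ d : Int → Int, (gates.foldl (fun d g => pvFset d g 0) d) v
      = if v ∈ gates then 0 else d v by simpa [pvInitB] using h (fun _ => pvINF)
  induction gates with
  | nil => simp
  | cons g rest ih =>
    intro d
    rw [List.foldl_cons, ih]
    by_cases h1 : v ∈ rest <;> by_cases h2 : v = g <;> simp [pvFset, h1, h2]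

lemma pvMinPair_mem (x : Int × Int) (l : List (Int × Int)) : pvMinPair x l ∈ x :: l := by
  induction l generalizing x with
  | nil => simp [pvMinPair]
  | cons y t ih =>
    have h := ih (if pvLt y x then y else x)
    simp only [pvMinPair, List.foldl_cons] at h ⊢
    rcases List.mem_cons.1 h with h | h
    · rw [h]; split <;> simp
    · simp [h]

-- ---------- B side: round-based relaxation reaches the greatest solution ----------

lemma pvStepB_fold_main (gates summits : List Int) (E : List (Int × Int × Int)) (N : Nat)
    (HE : ∀ e ∈ E, 0 ≤ e.2.1 ∧ e.2.1.toNat < N) :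
    ∀ (l : List (Int × Int × Int)), (∀ e ∈ l, e ∈ E) →
    ∀ (s : (Int → Int) × Bool), pvGood gates summits E s.1 →
    pvGood gates summits E (l.foldl (pvStepB summits) s).1 ∧
    (∀ v, (l.foldl (pvStepB summits) s).1 v ≤ s.1 v) ∧
    pvSum N (l.foldl (pvStepB summits) s).1 ≤ pvSum N s.1 ∧
    ((l.foldl (pvStepB summits) s).2 = false →
       (l.foldl (pvStepB summits) s).1 = s.1 ∧ s.2 = false ∧
       ∀ e ∈ l, e.1 ∉ summits → s.1 e.2.1 ≤ max (s.1 e.1) e.2.2) ∧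
    ((l.foldl (pvStepB summits) s).2 = true →
       s.2 = true ∨ pvSum N (l.foldl (pvStepB summits) s).1 < pvSum N s.1) := by
  intro l
  induction l with
  | nil =>
    intro _ s hg
    refine ⟨hg, fun v => le_refl _, le_refl _, ?_, ?_⟩
    · intro _; exact ⟨rfl, by simpa using ‹(List.foldl (pvStepB summits) s []).2 = false›, by simp⟩
    · intro h; left; simpa using h
  | cons e l ih =>
    intro hl s hg
    have heE : e ∈ E := hl e (List.mem_cons_self ..)
    have hl' : ∀ e' ∈ l, e' ∈ E := fun e' h => hl e' (List.mem_cons_of_mem _ h)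
    rw [List.foldl_cons]
    by_cases hs : e.1 ∈ summits
    · have hstep : pvStepB summits s e = s := by simp [pvStepB, hs]
      rw [hstep]
      obtain ⟨h1, h2, h3, h4, h5⟩ := ih hl' s hg
      refine ⟨h1, h2, h3, ?_, h5⟩
      intro hfl
      obtain ⟨ha, hb, hc⟩ := h4 hfl
      refine ⟨ha, hb, ?_⟩
      intro e' he'
      rcases List.mem_cons.1 he' with he' | he'
      · subst he'; intro hcon; exact absurd hs hcon
      · exact hc e' he'
    · by_cases hlt : max (s.1 e.1) e.2.2 < s.1 e.2.1
      · have hstep : pvStepB summits s e = (pvFset s.1 e.2.1 (max (s.1 e.1) e.2.2), true) := by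
          simp [pvStepB, hs, hlt]
        set t := max (s.1 e.1) e.2.2 with ht
        have hbounds := hg.1
        have ht0 : 0 ≤ t := le_trans (hbounds e.1).1 (le_max_left _ _)
        have htI : t ≤ pvINF := le_trans (le_of_lt hlt) (hbounds e.2.1).2
        have hgood' : pvGood gates summits E (pvFset s.1 e.2.1 t) := by
          refine ⟨?_, ?_, ?_⟩
          · intro v; by_cases hv : v = e.2.1 <;> simp [pvFset, hv]
            · exact ⟨ht0, htI⟩
            · exact hg.1 v
          · intro g hgm
            have := hg.2.1 g hgm
            by_cases hv : g = e.2.1 <;> simp [pvFset, hv]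
            · exfalso; rw [hv] at this; omega
            · exact this
          · intro x hx v
            by_cases hv : v = e.2.1 <;> simp [pvFset, hv]
            · calc x e.2.1 ≤ max (x e.1) e.2.2 := hx.2.2 e heE hs
                _ ≤ t := max_le_max (hg.2.2 x hx e.1) (le_refl _)
            · exact hg.2.2 x hx v
        have hpt : ∀ v, pvFset s.1 e.2.1 t v ≤ s.1 v := by
          intro v; by_cases hv : v = e.2.1 <;> simp [pvFset, hv]
          exact le_of_lt hlt
        have hsum : pvSum N (pvFset s.1 e.2.1 t) < pvSum N s.1 := by
          obtain ⟨h0, hN⟩ := HE e heE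
          rw [pvSum_fset N s.1 e.2.1 t h0 hN]; omega
        obtain ⟨h1, h2, h3, h4, h5⟩ := ih hl' (pvFset s.1 e.2.1 t, true) hgood'
        rw [hstep]
        refine ⟨h1, ?_, ?_, ?_, ?_⟩
        · intro v; exact le_trans (h2 v) (hpt v)
        · exact le_trans h3 (le_of_lt hsum)
        · intro hfl
          obtain ⟨_, hb, _⟩ := h4 hfl
          exact absurd hb (by simp)
        · intro _; right; exact lt_of_le_of_lt h3 hsum
      · have hstep : pvStepB summits s e = s := by simp [pvStepB, hs, hlt]
        rw [hstep]
        obtain ⟨h1, h2, h3, h4, h5⟩ := ih hl' s hg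
        refine ⟨h1, h2, h3, ?_, h5⟩
        intro hfl
        obtain ⟨ha, hb, hc⟩ := h4 hfl
        refine ⟨ha, hb, ?_⟩
        intro e' he'
        rcases List.mem_cons.1 he' with he' | he'
        · subst he'; intro _; omega
        · exact hc e' he'

lemma pvLoopB_main (gates summits : List Int) (E : List (Int × Int × Int)) (N : Nat)
    (HE : ∀ e ∈ E, 0 ≤ e.2.1 ∧ e.2.1.toNat < N) :
    ∀ (f : Nat) (d : Int → Int), pvGood gates summits E d → pvSum N d < (f : Int) →
    pvSol gates summits E (pvLoopB summits E f d) ∧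
    pvGood gates summits E (pvLoopB summits E f d) := by
  intro f
  induction f with
  | zero =>
    intro d hg hf
    exact absurd hf (by simpa using pvSum_nonneg N d (fun v => (hg.1 v).1))
  | succ f ih =>
    intro d hg hf
    obtain ⟨h1, h2, h3, h4, h5⟩ :=
      pvStepB_fold_main gates summits E N HE E (fun _ h => h) (d, false) hg
    show _ ∧ _
    rw [pvLoopB]
    by_cases hfl : (E.foldl (pvStepB summits) (d, false)).2 = true
    · rw [if_pos hfl]
      rcases h5 hfl with hcon | hlt
      · exact absurd hcon (by simp)
      · refine ih _ h1 ?_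
        have hlt' : pvSum N (List.foldl (pvStepB summits) (d, false) E).1 < pvSum N d := hlt
        push_cast at hf ⊢
        omega
    · rw [if_neg hfl]
      obtain ⟨ha, _, hc⟩ := h4 (by simpa using hfl)
      rw [ha]
      exact ⟨⟨hg.1, hg.2.1, hc⟩, hg⟩

-- ---------- A side: the worklist loop reaches the greatest solution ----------

lemma pvRelaxA_main (gates summits : List Int) (E : List (Int × Int × Int)) (N : Nat)
    (HE : ∀ e ∈ E, 0 ≤ e.2.1 ∧ e.2.1.toNat < N) (p i : Int) (hi : i ∉ summits) :
    ∀ (l : List (Int × Int)), (∀ jw ∈ l, (i, jw.1, jw.2) ∈ E) →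
    ∀ (dist : Int → Int) (q : List (Int × Int)),
    pvGood gates summits E dist →
    (∀ pi ∈ q, dist pi.2 ≤ pi.1) →
    dist i = p →
    pvGood gates summits E (pvRelaxA p l (dist, q)).1 ∧
    (∀ pi ∈ (pvRelaxA p l (dist, q)).2, (pvRelaxA p l (dist, q)).1 pi.2 ≤ pi.1) ∧
    (pvRelaxA p l (dist, q)).1 i = p ∧
    (∀ v, (pvRelaxA p l (dist, q)).1 v ≤ dist v) ∧
    (∀ jw ∈ l, (pvRelaxA p l (dist, q)).1 jw.1 ≤ max p jw.2) ∧
    (∀ k, (pvRelaxA p l (dist, q)).1 k = dist k ∨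
          ((pvRelaxA p l (dist, q)).1 k, k) ∈ (pvRelaxA p l (dist, q)).2) ∧
    (∀ z ∈ q, z ∈ (pvRelaxA p l (dist, q)).2) ∧
    pvSum N (pvRelaxA p l (dist, q)).1 + ((pvRelaxA p l (dist, q)).2.length : Int)
      ≤ pvSum N dist + q.length := by
  intro l
  induction l with
  | nil =>
    intro _ dist q hg hq hip
    exact ⟨hg, hq, hip, fun v => le_refl _, by simp, fun k => Or.inl rfl,
      fun z hz => hz, le_refl _⟩
  | cons jw l ih =>
    intro hl dist q hg hq hip
    have hjwE : (i, jw.1, jw.2) ∈ E := hl jw (List.mem_cons_self ..)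
    have hl' : ∀ x ∈ l, (i, x.1, x.2) ∈ E := fun x h => hl x (List.mem_cons_of_mem _ h)
    show _ ∧ _ ∧ _ ∧ _ ∧ _ ∧ _ ∧ _ ∧ _
    by_cases hlt : max p jw.2 < dist jw.1
    · have hstep : pvRelaxA p (jw :: l) (dist, q)
          = pvRelaxA p l (pvFset dist jw.1 (max p jw.2), q ++ [(max p jw.2, jw.1)]) := by
        simp only [pvRelaxA, List.foldl_cons]
        rw [if_pos hlt]
      set t := max p jw.2 with ht
      have hp0 : 0 ≤ p := hip ▸ (hg.1 i).1
      have ht0 : 0 ≤ t := le_trans hp0 (le_max_left _ _)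
      have htI : t ≤ pvINF := le_trans (le_of_lt hlt) (hg.1 jw.1).2
      have hij : i ≠ jw.1 := by
        intro hcon; rw [hcon] at hip; omega
      have hgood' : pvGood gates summits E (pvFset dist jw.1 t) := by
        refine ⟨?_, ?_, ?_⟩
        · intro v; by_cases hv : v = jw.1 <;> simp [pvFset, hv]
          · exact ⟨ht0, htI⟩
          · exact hg.1 v
        · intro g hgm
          have := hg.2.1 g hgm
          by_cases hv : g = jw.1 <;> simp [pvFset, hv]
          · exfalso; rw [hv] at this; omega
          · exact this
        · intro x hx v
          by_cases hv : v = jw.1 <;> simp [pvFset, hv]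
          · calc x jw.1 ≤ max (x i) jw.2 := hx.2.2 (i, jw.1, jw.2) hjwE hi
              _ ≤ t := by
                have := hg.2.2 x hx i
                rw [ht, hip] at *
                exact max_le_max (by omega) (le_refl _)
          · exact hg.2.2 x hx v
      have hq' : ∀ pi ∈ q ++ [(t, jw.1)], pvFset dist jw.1 t pi.2 ≤ pi.1 := by
        intro z hz
        rcases List.mem_append.1 hz with hz | hz
        · have h2 := hq z hz
          by_cases hv : z.2 = jw.1
          · have h3 : pvFset dist jw.1 t z.2 = t := by simp [pvFset, hv]
            rw [h3]
            rw [hv] at h2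
            exact le_trans (le_of_lt hlt) h2
          · have h3 : pvFset dist jw.1 t z.2 = dist z.2 := by simp [pvFset, hv]
            rw [h3]; exact h2
        · simp at hz
          rw [hz]
          have h3 : pvFset dist jw.1 t (t, jw.1).2 = t := by simp [pvFset]
          rw [h3]
      have hip' : pvFset dist jw.1 t i = p := by simp [pvFset, hij, hip]
      obtain ⟨c1, c2, c3, c4, c5, c6, c7, c8⟩ :=
        ih hl' (pvFset dist jw.1 t) (q ++ [(t, jw.1)]) hgood' hq' hip'
      rw [hstep]
      have hptw : ∀ v, pvFset dist jw.1 t v ≤ dist v := by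
        intro v; by_cases hv : v = jw.1 <;> simp [pvFset, hv]
        exact le_of_lt hlt
      refine ⟨c1, c2, c3, ?_, ?_, ?_, ?_, ?_⟩
      · intro v; exact le_trans (c4 v) (hptw v)
      · intro z hz
        rcases List.mem_cons.1 hz with hz | hz
        · rw [hz]
          have h3 : pvFset dist jw.1 t jw.1 = t := by simp [pvFset]
          exact le_trans (c4 jw.1) (le_of_eq (h3.trans ht))
        · exact c5 z hz
      · intro k
        rcases c6 k with hk | hk
        · by_cases hv : k = jw.1
          · right
            have : pvFset dist jw.1 t k = t := by simp [pvFset, hv]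
            rw [hk, this]
            rw [hv]
            exact c7 _ (by simp)
          · left; rw [hk]; simp [pvFset, hv]
        · right; exact hk
      · intro z hz; exact c7 z (List.mem_append.2 (Or.inl hz))
      · obtain ⟨h0, hN⟩ := HE _ hjwE
        have hsum : pvSum N (pvFset dist jw.1 t) = pvSum N dist + t - dist jw.1 :=
          pvSum_fset N dist jw.1 t h0 hN
        have hlen : ((q ++ [(t, jw.1)]).length : Int) = q.length + 1 := by simp
        calc pvSum N (pvRelaxA p l (pvFset dist jw.1 t, q ++ [(t, jw.1)])).1
              + ((pvRelaxA p l (pvFset dist jw.1 t, q ++ [(t, jw.1)])).2.length : Int)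
            ≤ pvSum N (pvFset dist jw.1 t) + ((q ++ [(t, jw.1)]).length : Int) := c8
          _ ≤ pvSum N dist + q.length := by rw [hsum, hlen]; omega
    · have hstep : pvRelaxA p (jw :: l) (dist, q) = pvRelaxA p l (dist, q) := by
        simp only [pvRelaxA, List.foldl_cons]
        rw [if_neg hlt]
      obtain ⟨c1, c2, c3, c4, c5, c6, c7, c8⟩ := ih hl' dist q hg hq hip
      rw [hstep]
      refine ⟨c1, c2, c3, c4, ?_, c6, c7, c8⟩
      intro z hz
      rcases List.mem_cons.1 hz with hz | hz
      · rw [hz]; exact le_trans (c4 jw.1) (by omega)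
      · exact c5 z hz

lemma pvLoopA_main (gates summits : List Int) (E : List (Int × Int × Int)) (N : Nat)
    (HE : ∀ e ∈ E, 0 ≤ e.2.1 ∧ e.2.1.toNat < N)
    (graph : Int → List (Int × Int)) (Hg : ∀ v x w, ((x, w) ∈ graph v ↔ (v, x, w) ∈ E)) :
    ∀ (f : Nat) (dist : Int → Int) (q : List (Int × Int)),
    pvGood gates summits E dist →
    (∀ pi ∈ q, dist pi.2 ≤ pi.1) →
    (∀ k, k ∉ summits → ((dist k, k) ∈ q ∨ ∀ e ∈ E, e.1 = k → dist e.2.1 ≤ max (dist e.1) e.2.2)) →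
    pvSum N dist + (q.length : Int) < (f : Int) →
    pvSol gates summits E (pvLoopA summits graph f dist q) ∧
    pvGood gates summits E (pvLoopA summits graph f dist q) := by
  intro f
  induction f with
  | zero =>
    intro d q hg hq hiv hf
    have := pvSum_nonneg N d (fun v => (hg.1 v).1)
    simp at hf
    omega
  | succ f ih =>
    intro dist q hg hq hiv hf
    match hq0 : q with
    | [] =>
      rw [pvLoopA]
      refine ⟨⟨hg.1, hg.2.1, ?_⟩, hg⟩
      intro e heE hes
      rcases hiv e.1 hes with hk | hk
      · simp at hk
      · exact hk e heE rfl
    | x :: rest =>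
      rw [pvLoopA]
      have hm := pvMinPair_mem x rest
      set m := pvMinPair x rest with hmdef
      have hlen : ((x :: rest).erase m).length = rest.length := by
        rw [List.length_erase_of_mem hm]; simp
      have hq'sub : ∀ z ∈ (x :: rest).erase m, z ∈ x :: rest := fun z hz => List.mem_of_mem_erase hz
      have hq' : ∀ pi ∈ (x :: rest).erase m, dist pi.2 ≤ pi.1 := fun z hz => hq z (hq'sub z hz)
      by_cases hskip : dist m.2 < m.1 ∨ m.2 ∈ summits
      · rw [if_pos hskip]
        refine ih dist _ hg hq' ?_ ?_
        · intro k hk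
          rcases hiv k hk with hkk | hkk
          · left
            have hne : (dist k, k) ≠ m := by
              rcases hskip with hs | hs
              · intro hcon; rw [← hcon] at hs; simp at hs
              · intro hcon
                apply hk
                have : k = m.2 := by rw [← hcon]
                rwa [this]
            exact (List.mem_erase_of_ne hne).2 hkk
          · right; exact hkk
        · rw [hlen]
          have h1 : ((x :: rest).length : Int) = (rest.length : Int) + 1 := by simp
          rw [h1] at hf
          push_cast at hf ⊢
          omega
      · rw [if_neg hskip]
        obtain ⟨hge0, hmns⟩ := not_or.1 hskip
        have hmp : dist m.2 = m.1 := le_antisymm (hq m hm) (not_lt.1 hge0)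
        have hl : ∀ jw ∈ graph m.2, (m.2, jw.1, jw.2) ∈ E := by
          intro jw hjw; exact (Hg m.2 jw.1 jw.2).1 hjw
        obtain ⟨c1, c2, c3, c4, c5, c6, c7, c8⟩ :=
          pvRelaxA_main gates summits E N HE m.1 m.2 hmns (graph m.2) hl dist
            ((x :: rest).erase m) hg hq' hmp
        refine ih _ _ c1 c2 ?_ ?_
        · intro k hk
          by_cases hkm : k = m.2
          · right
            intro e heE he1
            have he1' : e.1 = m.2 := by rw [he1, hkm]
            have h6 : (m.2, e.2.1, e.2.2) = e := by rw [← he1']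
            have hjw : (e.2.1, e.2.2) ∈ graph m.2 := by
              apply (Hg m.2 e.2.1 e.2.2).2
              rw [h6]; exact heE
            have h5 := c5 (e.2.1, e.2.2) hjw
            rw [he1', c3]
            simpa using h5
          · rcases c6 k with hck | hck
            · rcases hiv k hk with hkk | hkk
              · left
                have hne : (dist k, k) ≠ m := by
                  intro hcon
                  apply hkm
                  rw [← hcon]
                rw [hck]
                exact c7 _ ((List.mem_erase_of_ne hne).2 hkk)
              · right
                intro e heE he1
                have h1 := c4 e.2.1
                have h2 := hkk e heE he1
                have h3 : (pvRelaxA m.1 (graph m.2) (dist, (x :: rest).erase m)).1 e.1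
                    = dist e.1 := by rw [he1]; exact hck
                rw [h3]
                exact le_trans h1 h2
            · left; exact hck
        · have h2 := c8
          rw [hlen] at h2
          have h1 : ((x :: rest).length : Int) = (rest.length : Int) + 1 := by simp
          rw [h1] at hf
          push_cast at hf h2 ⊢
          omega

-- ---------- selection: sorted(...)[0] with key (dist, id) = min over (dist, id) ----------

lemma pvMin2_spec (d : Int → Int) :
    ∀ (l : List Int), l ≠ [] → ∃ s₀, PySem.List.min2? l d (fun s => s) = some s₀ ∧ s₀ ∈ l ∧
      ∀ y ∈ l, d s₀ < d y ∨ (d s₀ = d y ∧ s₀ ≤ y) := by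
  intro l
  induction l using List.reverseRecOn with
  | nil => intro h; exact absurd rfl h
  | append_singleton t y ih =>
    intro _
    unfold PySem.List.min2? at *
    rw [List.foldl_append]
    cases t with
    | nil =>
      refine ⟨y, by simp, by simp, ?_⟩
      intro z hz
      simp at hz
      subst hz
      right; exact ⟨rfl, le_refl _⟩
    | cons a t' =>
      obtain ⟨s₀, h0, hmem, hall⟩ := ih (by simp)
      rw [h0]
      simp only [List.foldl_cons, List.foldl_nil]
      by_cases hb : (decide (d y < d s₀) || (!decide (d s₀ < d y) && decide (y < s₀))) = true
      · rw [if_pos hb]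
        simp only [Bool.or_eq_true, Bool.and_eq_true, Bool.not_eq_true',
          decide_eq_true_eq, decide_eq_false_iff_not] at hb
        refine ⟨y, rfl, by simp, ?_⟩
        intro z hz
        rcases List.mem_append.1 hz with hz | hz
        · have h := hall z hz
          omega
        · simp at hz
          subst hz
          right; exact ⟨rfl, le_refl _⟩
      · rw [if_neg hb]
        simp only [Bool.or_eq_true, Bool.and_eq_true, Bool.not_eq_true',
          decide_eq_true_eq, decide_eq_false_iff_not, not_or, not_and, not_lt] at hb
        refine ⟨s₀, rfl, List.mem_append.2 (Or.inl hmem), ?_⟩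
        intro z hz
        rcases List.mem_append.1 hz with hz | hz
        · exact hall z hz
        · simp at hz
          subst hz
          omega

lemma pvFoldInsert_mem {α : Type} (before : α → α → Bool) :
    ∀ (l acc : List α) (y : α), (y ∈ acc ∨ y ∈ l) →
      y ∈ l.foldl (fun acc x => PySem.List.insertBy before x acc) acc := by
  intro l
  induction l with
  | nil =>
    intro acc y h
    rcases h with h | h
    · exact h
    · simp at h
  | cons x l ih =>
    intro acc y h
    rw [List.foldl_cons]
    rcases h with h | h
    · exact ih _ y (Or.inl ((PySem.List.mem_insertBy _ _ _ _).2 (Or.inr h)))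
    · rcases List.mem_cons.1 h with h | h
      · exact ih _ y (Or.inl ((PySem.List.mem_insertBy _ _ _ _).2 (Or.inl h)))
      · exact ih _ y (Or.inr h)

lemma pvFoldInsert_headmin {α : Type} (before : α → α → Bool)
    (hasym : ∀ a b, before a b = true → before b a = false)
    (htrans : ∀ a b c, before a b = true → before b c = true → before a c = true) :
    ∀ (l acc : List α),
      (∀ m t, acc = m :: t → ∀ z ∈ acc, before z m = false) →
      (∀ m t, l.foldl (fun acc x => PySem.List.insertBy before x acc) acc = m :: t →
        ∀ z ∈ l.foldl (fun acc x => PySem.List.insertBy before x acc) acc, before z m = false) := by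
  have hirr : ∀ a, before a a = false := by
    intro a
    by_cases h : before a a = true
    · exact hasym a a h
    · simpa using h
  have hstep : ∀ (x : α) (acc : List α),
      (∀ m t, acc = m :: t → ∀ z ∈ acc, before z m = false) →
      (∀ m t, PySem.List.insertBy before x acc = m :: t →
        ∀ z ∈ PySem.List.insertBy before x acc, before z m = false) := by
    intro x acc
    induction acc with
    | nil =>
      intro _ m t hmt z hz
      have h1 : PySem.List.insertBy before x [] = [x] := by simp [PySem.List.insertBy]
      rw [h1] at hmt hz
      injection hmt with h2 _
      simp at hz
      rw [hz, ← h2]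
      exact hirr x
    | cons y ys ihy =>
      intro hP m t hmt z hz
      have hins : PySem.List.insertBy before x (y :: ys)
          = if before x y = true then x :: y :: ys else y :: PySem.List.insertBy before x ys := by
        simp [PySem.List.insertBy]
      by_cases hxy : before x y = true
      · rw [hins, if_pos hxy] at hmt hz
        have hmx : m = x := by injection hmt with h1 _; exact h1.symm
        subst hmx
        rcases List.mem_cons.1 hz with hz | hz
        · rw [hz]; exact hirr m
        rcases List.mem_cons.1 hz with hz | hz
        · rw [hz]; exact hasym _ _ hxy
        · have h1 : before z y = false := hP y ys rfl z (List.mem_cons_of_mem _ hz)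
          by_cases h2 : before z m = true
          · exact absurd (htrans z m y h2 hxy) (by simp [h1])
          · simpa using h2
      · rw [hins, if_neg hxy] at hmt hz
        have hmy : m = y := by injection hmt with h1 _; exact h1.symm
        subst hmy
        rcases List.mem_cons.1 hz with hz | hz
        · rw [hz]; exact hirr m
        · rw [PySem.List.mem_insertBy _ _ _ _] at hz
          rcases hz with hz | hz
          · rw [hz]; simpa using hxy
          · exact hP m ys rfl z (List.mem_cons_of_mem _ hz)
  intro l
  induction l with
  | nil => intro acc hP; exact hP
  | cons x l ih =>
    intro acc hP
    rw [List.foldl_cons]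
    exact ih _ (hstep x acc hP)

lemma pvSelect (summits : List Int) (d : Int → Int) (hne : summits ≠ []) :
    PySem.List.pyGetD
      (PySem.List.sorted2 ((PySem.Set.ofList summits).map (fun s => [s, d s]))
        (fun x => PySem.List.pyGetD x 1 0) (fun x => PySem.List.pyGetD x 0 0)) 0 []
    = (match PySem.List.min2? summits (fun s => d s) (fun s => s) with
      | some s => [s, d s]
      | none => ([] : List Int)) := by
  obtain ⟨s₀, hmin, hs₀mem, hs₀all⟩ := pvMin2_spec d summits hne
  rw [hmin]
  have hLne : ((PySem.Set.ofList summits).map (fun s => [s, d s])) ≠ [] := by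
    intro hcon
    have h1 : s₀ ∈ PySem.Set.ofList summits := (PySem.Set.mem_ofList _ _).2 hs₀mem
    have h2 : [s₀, d s₀] ∈ (PySem.Set.ofList summits).map (fun s => [s, d s]) :=
      List.mem_map.2 ⟨s₀, h1, rfl⟩
    rw [hcon] at h2
    simp at h2
  cases hsrt : PySem.List.sorted2 ((PySem.Set.ofList summits).map (fun s => [s, d s]))
      (fun x => PySem.List.pyGetD x 1 0) (fun x => PySem.List.pyGetD x 0 0) with
  | nil =>
    exfalso
    have hperm := PySem.List.sorted2_perm ((PySem.Set.ofList summits).map (fun s => [s, d s]))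
      (fun x => PySem.List.pyGetD x 1 0) (fun x => PySem.List.pyGetD x 0 0) false
    rw [hsrt] at hperm
    exact hLne hperm.symm.eq_nil
  | cons m t =>
    rw [PySem.List.pyGetD_zero_cons]
    -- the head is an element of L
    have hperm := PySem.List.sorted2_perm ((PySem.Set.ofList summits).map (fun s => [s, d s]))
      (fun x => PySem.List.pyGetD x 1 0) (fun x => PySem.List.pyGetD x 0 0) false
    rw [hsrt] at hperm
    have hmemL : m ∈ (PySem.Set.ofList summits).map (fun s => [s, d s]) :=
      hperm.subset (List.mem_cons_self ..)
    obtain ⟨s₁, hs₁set, hm⟩ := List.mem_map.1 hmemL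
    have hs₁mem : s₁ ∈ summits := (PySem.Set.mem_ofList _ _).1 hs₁set
    -- head-minimality
    have hsrt' : ((PySem.Set.ofList summits).map (fun s => [s, d s])).foldl
        (fun acc x => PySem.List.insertBy
          (fun a b => decide (PySem.List.pyGetD a 1 0 < PySem.List.pyGetD b 1 0)
            || (!decide (PySem.List.pyGetD b 1 0 < PySem.List.pyGetD a 1 0)
                && decide (PySem.List.pyGetD a 0 0 < PySem.List.pyGetD b 0 0))) x acc) []
        = m :: t := by
      rw [← hsrt]
      rfl
    have hy₀L : [s₀, d s₀] ∈ (PySem.Set.ofList summits).map (fun s => [s, d s]) :=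
      List.mem_map.2 ⟨s₀, (PySem.Set.mem_ofList _ _).2 hs₀mem, rfl⟩
    have hy₀res : [s₀, d s₀] ∈ m :: t := by
      rw [← hsrt']
      exact pvFoldInsert_mem _ _ [] _ (Or.inr hy₀L)
    have hhm := pvFoldInsert_headmin
      (fun (a b : List Int) => decide (PySem.List.pyGetD a 1 0 < PySem.List.pyGetD b 1 0)
        || (!decide (PySem.List.pyGetD b 1 0 < PySem.List.pyGetD a 1 0)
            && decide (PySem.List.pyGetD a 0 0 < PySem.List.pyGetD b 0 0)))
      (by intro a b h; simp at h ⊢; omega)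
      (by intro a b c h1 h2; simp at h1 h2 ⊢; omega)
      ((PySem.Set.ofList summits).map (fun s => [s, d s])) []
      (by intro m' t' hcon; simp at hcon)
      m t hsrt' [s₀, d s₀] (hsrt' ▸ hy₀res)
    rw [← hm] at hhm
    have hhm2 : (decide (d s₀ < d s₁)
        || (!decide (d s₁ < d s₀) && decide (s₀ < s₁))) = false := hhm
    simp only [Bool.or_eq_false_iff, Bool.and_eq_false_iff, Bool.not_eq_false',
      decide_eq_false_iff_not, decide_eq_true_eq, not_lt] at hhm2
    have hlex := hs₀all s₁ hs₁mem
    have heq : s₀ = s₁ ∧ d s₀ = d s₁ := by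
      rcases hhm2 with ⟨h1, h2 | h2⟩ <;> omega
    rw [← hm, ← heq.1]

-- ===== VERDICT (by name: the statement is the Claim_ definition above) =====
lemma pvInitB_good (gates summits : List Int) (E : List (Int × Int × Int)) :
    pvGood gates summits E (pvInitB gates) := by
  refine ⟨?_, ?_, ?_⟩
  · intro v
    rw [pvInitB_val]
    split <;> simp [pvINF]
  · intro g hg
    rw [pvInitB_val]
    rw [if_pos hg]
  · intro x hx v
    rw [pvInitB_val]
    by_cases hv : v ∈ gates
    · rw [if_pos hv, hx.2.1 v hv]
    · rw [if_neg hv]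
      exact (hx.1 v).2

theorem solution_spec : Claim_equal_solution := by
  unfold Claim_equal_solution
  intro n paths gates summits hdom hpre
  obtain ⟨hn, hsumne, hpaths, hgates, hsummits, _⟩ := hpre
  unfold Spec_solution
  have hwrap : ∀ x : Int, -(n+1) ≤ x → x ≤ n → 0 ≤ pvWrap n x ∧ pvWrap n x ≤ n := by
    intro x h1 h2
    unfold pvWrap
    split <;> omega
  have HE : ∀ e ∈ pvEdges (paths.map (fun p => (pvWrap n p.1, pvWrap n p.2.1, p.2.2))),
      0 ≤ e.2.1 ∧ e.2.1.toNat < (n + 1).toNat := by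
    intro e he
    rcases (mem_pvEdges _ e).1 he with ⟨p', hp', hcase⟩
    rcases List.mem_map.1 hp' with ⟨p, hp, hpp⟩
    have hp2 := hpaths p hp
    have hw1 := hwrap p.1 hp2.1 hp2.2.1
    have hw2 := hwrap p.2.1 hp2.2.2.1 hp2.2.2.2
    rcases hcase with h | h <;> rw [h, ← hpp] <;> constructor <;> simp <;> omega
  set gates' := gates.map (pvWrap n) with hg'
  set summits' := summits.map (pvWrap n) with hs'
  set paths' := paths.map (fun p => (pvWrap n p.1, pvWrap n p.2.1, p.2.2)) with hp'
  have hgood0 : pvGood gates' summits' (pvEdges paths') (pvInitB gates') :=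
    pvInitB_good gates' summits' (pvEdges paths')
  have hsum0 : pvSum (n + 1).toNat (pvInitB gates') ≤ ((n + 1).toNat : Int) * pvINF :=
    pvSum_le (n + 1).toNat (pvInitB gates') (fun v => (hgood0.1 v).2)
  have hNc : (((n + 1).toNat : Nat) : Int) = n + 1 := Int.toNat_of_nonneg (by omega)
  have hP0 : (0 : Int) ≤ (n + 1) * pvINF := mul_nonneg (by omega) (by norm_num [pvINF])
  have hPc : ((((n + 1) * pvINF).toNat : Nat) : Int) = (n + 1) * pvINF :=
    Int.toNat_of_nonneg hP0
  have hsum0' : pvSum (n + 1).toNat (pvInitB gates') ≤ (n + 1) * pvINF := by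
    rw [hNc] at hsum0
    exact hsum0
  -- run A
  obtain ⟨hsolA, hgoodA⟩ := pvLoopA_main gates' summits' (pvEdges paths') (n + 1).toNat HE
    (pvGraph paths') (fun v x w => mem_pvGraph paths' v x w)
    (((n + 1) * pvINF).toNat + gates.length + 1)
    (pvInitB gates') (gates'.map (fun g => (0, g)))
    hgood0
    (by
      intro pi hpi
      rcases List.mem_map.1 hpi with ⟨g, hg, hpig⟩
      rw [← hpig]
      have := hgood0.2.1 g hg
      simp [this])
    (by
      intro k hk
      by_cases hkg : k ∈ gates'
      · left
        have hz : pvInitB gates' k = 0 := hgood0.2.1 k hkg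
        rw [hz]
        exact List.mem_map.2 ⟨k, hkg, rfl⟩
      · right
        intro e heE he1
        have hI : pvInitB gates' e.1 = pvINF := by
          rw [pvInitB_val, if_neg (he1 ▸ hkg)]
        calc pvInitB gates' e.2.1 ≤ pvINF := (hgood0.1 e.2.1).2
          _ = pvInitB gates' e.1 := hI.symm
          _ ≤ max (pvInitB gates' e.1) e.2.2 := le_max_left _ _)
    (by
      rw [List.length_map, List.length_map]
      push_cast [hPc]
      omega)
  -- run B
  obtain ⟨hsolB, hgoodB⟩ := pvLoopB_main gates' summits' (pvEdges paths') (n + 1).toNat HE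
    (((n + 1) * pvINF).toNat + 1) (pvInitB gates') hgood0
    (by push_cast [hPc]; omega)
  -- the two dist maps agree
  have heq : pvLoopA summits' (pvGraph paths') (((n + 1) * pvINF).toNat + gates.length + 1)
        (pvInitB gates') (gates'.map (fun g => (0, g)))
      = pvLoopB summits' (pvEdges paths') (((n + 1) * pvINF).toNat + 1) (pvInitB gates') := by
    funext v
    exact le_antisymm (hgoodB.2.2 _ hsolA v) (hgoodA.2.2 _ hsolB v)
  show solution n paths gates summits = solution_alt n paths gates summits
  unfold solution solution_alt
  rw [pvInitA_eq]
  show PySem.List.pyGetD (PySem.List.sorted2 _ _ _) 0 [] = _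
  rw [heq]
  exact pvSelect summits _ hsumne
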